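-- pv_equiv track=rewrite | github.com/zqq0207/EveIDE_LIGHT | source/SimulatorFileManager.py | get1stSymPos
-- ===== SOURCE A (Python) =====
-- def get1stSymPos(s, fromPos = 0):
--     g_DictSymbols = {'"': '"', '/*': '*/','//':'\n'}
--     listPos = [] #位置,符号
--     for b in g_DictSymbols:
--         pos = s.find(b, fromPos)
--         listPos.append((pos,b)) #插入位置以及结束符号
--     minIndex = -1 #最小位置在listPos中的索引
--     index = 0 #索引
--     while index < len(listPos):
--         pos = listPos[index][0] #位置
--         if minIndex < 0 and pos >= 0: #第一个非负位置
--             minIndex = index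
--         if 0 <= pos < listPos[minIndex][0]: #后面出现的更靠前的位置
--             minIndex = index
--         index = index+1
--     if minIndex == -1: #没找到
--         return (-1,None)
--     else:
--         return (listPos[minIndex])
-- ===== SOURCE B (Python) =====
-- def get1stSymPos(s, fromPos = 0):
--     # Single left-to-right scan from the normalized start position, recognizing
--     # the earliest delimiter ('"', '/*', '//') directly by its characters.
--     n = len(s)
--     start = fromPos if fromPos >= 0 else max(0, n + fromPos)
--     for i in range(start, n):
--         c = s[i]
--         if c == '"':
--             return (i, '"')
--         if c == '/' and i + 1 < n:
--             c2 = s[i + 1]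
--             if c2 == '*':
--                 return (i, '/*')
--             if c2 == '/':
--                 return (i, '//')
--     return (-1, None)
-- ===== Notes on version B (the rewrite author's own statement) =====
-- stated objective: alternative
-- what changed: Replaces three independent str.find scans plus a manual argmin while-loop over the (pos,symbol) list with one left-to-right character scan from the normalized start that recognizes whichever delimiter occurs first directly.
import Mathlib
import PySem

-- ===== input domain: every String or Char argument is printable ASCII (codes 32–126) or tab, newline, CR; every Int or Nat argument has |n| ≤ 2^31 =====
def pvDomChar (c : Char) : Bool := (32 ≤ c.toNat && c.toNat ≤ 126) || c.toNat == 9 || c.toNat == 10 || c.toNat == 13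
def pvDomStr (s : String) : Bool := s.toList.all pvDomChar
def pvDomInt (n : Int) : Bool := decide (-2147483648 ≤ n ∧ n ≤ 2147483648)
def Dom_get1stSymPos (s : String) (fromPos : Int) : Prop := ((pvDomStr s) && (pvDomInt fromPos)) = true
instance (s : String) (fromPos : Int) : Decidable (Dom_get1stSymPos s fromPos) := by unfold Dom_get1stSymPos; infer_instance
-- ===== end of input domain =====

-- B replaces A's three str.find scans plus a manual argmin loop with one character scan
-- from the normalized start (alternative decomposition; same return value, proved below).

-- ===== PORT A =====
-- the while-loop of A: walks listPos keeping minIndex (Python's negative indexing kept via pyGetD)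
def get1stSymPosLoopA (listPos : List (Int × String)) (minIndex : Int) (index : Nat) : Int :=
  if index < listPos.length then
    let pos := (PySem.List.pyGetD listPos (index : Int) (-1, "")).1
    let m1 := if minIndex < 0 ∧ 0 ≤ pos then (index : Int) else minIndex
    let m2 := if 0 ≤ pos ∧ pos < (PySem.List.pyGetD listPos m1 (-1, "")).1 then (index : Int) else m1
    get1stSymPosLoopA listPos m2 (index + 1)
  else minIndex
termination_by listPos.length - index

def get1stSymPos (s : String) (fromPos : Int) : Int × Option String :=
  let g : PySem.Dict String String :=
    (((PySem.Dict.empty).insert "\"" "\"").insert "/*" "*/").insert "//" "\n"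
  let listPos : List (Int × String) :=
    g.keys.foldl (fun acc b => acc ++ [(PySem.Str.findFrom s b fromPos, b)]) []
  let minIndex := get1stSymPosLoopA listPos (-1) 0
  if minIndex = -1 then (-1, none)
  else
    let pb := PySem.List.pyGetD listPos minIndex (-1, "")
    (pb.1, some pb.2)

-- ===== PORT B =====
-- the scan of B: first index (absolute) whose characters start a delimiter
def get1stSymPosScan : List Char → Nat → Int × Option String
  | [], _ => (-1, none)
  | c :: rest, i =>
    if c = '"' then ((i : Int), some "\"")
    else if c = '/' then
      match rest with
      | '*' :: _ => ((i : Int), some "/*")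
      | '/' :: _ => ((i : Int), some "//")
      | _ => get1stSymPosScan rest (i + 1)
    else get1stSymPosScan rest (i + 1)

def get1stSymPos_alt (s : String) (fromPos : Int) : Int × Option String :=
  let n := s.toList.length
  let start : Nat := if fromPos < 0 then ((n : Int) + fromPos).toNat else fromPos.toNat
  get1stSymPosScan (s.toList.drop start) start

-- ===== PRECONDITION & SPEC =====
def Spec_get1stSymPos (s : String) (fromPos : Int) (out : Int × Option String) : Prop := out = get1stSymPos_alt s fromPos
instance (s : String) (fromPos : Int) (out : Int × Option String) : Decidable (Spec_get1stSymPos s fromPos out) := by unfold Spec_get1stSymPos; infer_instance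

-- ===== CLAIM (what is proved, stated in full; the proofs are below) =====
def Claim_equal_get1stSymPos : Prop := ∀ (s : String) (fromPos : Int), Dom_get1stSymPos s fromPos → Spec_get1stSymPos s fromPos (get1stSymPos s fromPos)

-- ===== LEMMAS AND PROOFS =====

-- selection of the first/lowest of three candidate positions (proof-side normal form)
def pvPick (i : Nat) (f1 f2 f3 : Int) : Int × Option String :=
  if 0 ≤ f1 ∧ (f2 < 0 ∨ f1 ≤ f2) ∧ (f3 < 0 ∨ f1 ≤ f3) then ((i : Int) + f1, some "\"")
  else if 0 ≤ f2 ∧ (f3 < 0 ∨ f2 ≤ f3) then ((i : Int) + f2, some "/*")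
  else if 0 ≤ f3 then ((i : Int) + f3, some "//")
  else (-1, none)

theorem find_eq_of (x sub : List Char) (k : Nat)
    (hp : sub <+: x.drop k) (hmin : ∀ i < k, ¬ sub <+: x.drop i) :
    PySem.Chars.find x sub = (k : Int) := by
  have hinf : sub <:+: x := hp.isInfix.trans (x.drop_suffix k).isInfix
  have h0 : 0 ≤ PySem.Chars.find x sub := (PySem.Chars.find_nonneg_iff x sub).mpr hinf
  obtain ⟨hp', hmin'⟩ := PySem.Chars.find_spec h0
  set m := (PySem.Chars.find x sub).toNat with hm
  rcases Nat.lt_trichotomy m k with h | h | h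
  · exact absurd hp' (hmin m h)
  · omega
  · exact absurd hp (hmin' k h)

theorem find_cons (c : Char) (d sub : List Char) :
    PySem.Chars.find (c :: d) sub =
      if sub <+: c :: d then 0
      else if PySem.Chars.find d sub = -1 then -1 else 1 + PySem.Chars.find d sub := by
  by_cases hp : sub <+: c :: d
  · rw [if_pos hp]
    exact find_eq_of _ _ 0 (by simpa using hp) (by omega)
  · rw [if_neg hp]
    by_cases hd : PySem.Chars.find d sub = -1
    · rw [if_pos hd]
      rw [PySem.Chars.find_eq_neg_one_iff] at hd ⊢
      intro hinf
      rcases hinf with ⟨pre, suf, h⟩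
      cases pre with
      | nil => exact hp ⟨suf, by simpa using h⟩
      | cons a t =>
        exact hd ⟨t, suf, by simpa using congrArg List.tail h⟩
    · rw [if_neg hd]
      have h0 : 0 ≤ PySem.Chars.find d sub := by
        have := PySem.Chars.neg_one_le_find d sub; omega
      obtain ⟨hp', hmin'⟩ := PySem.Chars.find_spec h0
      have := find_eq_of (c :: d) sub ((PySem.Chars.find d sub).toNat + 1)
        (by simpa using hp')
        (by
          intro i hi
          cases i with
          | zero => simpa using hp
          | succ j => simpa using hmin' j (by omega))
      rw [this]; omega

theorem pick_shift (i : Nat) (f1 f2 f3 : Int)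
    (h1 : -1 ≤ f1) (h2 : -1 ≤ f2) (h3 : -1 ≤ f3) :
    pvPick i (if f1 = -1 then -1 else 1 + f1) (if f2 = -1 then -1 else 1 + f2)
      (if f3 = -1 then -1 else 1 + f3) = pvPick (i + 1) f1 f2 f3 := by
  unfold pvPick
  split_ifs <;> (apply Prod.ext <;> simp <;> omega)

theorem find_nil_ne (sub : List Char) (h : sub ≠ []) : PySem.Chars.find [] sub = -1 := by
  rw [PySem.Chars.find_eq_neg_one_iff]
  simp [h]

theorem scan_eq_pick (d : List Char) (i : Nat) :
    get1stSymPosScan d i =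
      pvPick i (PySem.Chars.find d ['"']) (PySem.Chars.find d ['/', '*'])
        (PySem.Chars.find d ['/', '/']) := by
  induction d generalizing i with
  | nil => simp [get1stSymPosScan, find_nil_ne, pvPick]
  | cons c rest ih =>
    rw [find_cons, find_cons, find_cons]
    by_cases hq : c = '"'
    · subst hq
      rw [if_pos (by simp : (['"'] : List Char) <+: '"' :: rest),
        if_neg (by simp : ¬ (['/', '*'] : List Char) <+: '"' :: rest),
        if_neg (by simp : ¬ (['/', '/'] : List Char) <+: '"' :: rest)]
      have g2 := PySem.Chars.neg_one_le_find rest ['/', '*']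
      have g3 := PySem.Chars.neg_one_le_find rest ['/', '/']
      simp only [get1stSymPosScan, if_pos rfl]
      by_cases e2 : PySem.Chars.find rest ['/', '*'] = -1 <;>
        by_cases e3 : PySem.Chars.find rest ['/', '/'] = -1 <;>
        simp only [e2, e3, if_true, if_false, reduceIte] <;>
        (unfold pvPick; split_ifs <;>
          first
          | (apply Prod.ext <;> simp <;> omega)
          | (exfalso; omega))
    · by_cases hs : c = '/'
      · subst hs
        rw [if_neg (by simp : ¬ (['"'] : List Char) <+: '/' :: rest)]
        cases rest with
        | nil =>
          rw [if_neg (by simp : ¬ (['/', '*'] : List Char) <+: ['/']),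
            if_neg (by simp : ¬ (['/', '/'] : List Char) <+: ['/'])]
          simp only [get1stSymPosScan, reduceIte]
          rw [find_nil_ne _ (by simp), find_nil_ne _ (by simp), find_nil_ne _ (by simp)]
          simp [pvPick]
        | cons c2 t =>
          by_cases ha : c2 = '*'
          · subst ha
            rw [if_pos (by simp : (['/', '*'] : List Char) <+: '/' :: '*' :: t),
              if_neg (by simp : ¬ (['/', '/'] : List Char) <+: '/' :: '*' :: t)]
            have g1 := PySem.Chars.neg_one_le_find ('*' :: t) ['"']
            have g3 := PySem.Chars.neg_one_le_find ('*' :: t) ['/', '/']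
            simp only [get1stSymPosScan, reduceIte]
            by_cases e1 : PySem.Chars.find ('*' :: t) ['"'] = -1 <;>
              by_cases e3 : PySem.Chars.find ('*' :: t) ['/', '/'] = -1 <;>
              simp only [e1, e3, if_true, if_false, reduceIte] <;>
              (unfold pvPick; split_ifs <;>
                first
                | (apply Prod.ext <;> simp <;> omega)
                | (exfalso; omega))
          · by_cases hb : c2 = '/'
            · subst hb
              rw [if_neg (by simp : ¬ (['/', '*'] : List Char) <+: '/' :: '/' :: t),
                if_pos (by simp : (['/', '/'] : List Char) <+: '/' :: '/' :: t)]
              have g1 := PySem.Chars.neg_one_le_find ('/' :: t) ['"']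
              have g2 := PySem.Chars.neg_one_le_find ('/' :: t) ['/', '*']
              simp only [get1stSymPosScan, reduceIte]
              by_cases e1 : PySem.Chars.find ('/' :: t) ['"'] = -1 <;>
                by_cases e2 : PySem.Chars.find ('/' :: t) ['/', '*'] = -1 <;>
                simp only [e1, e2, if_true, if_false, reduceIte] <;>
                (unfold pvPick; split_ifs <;>
                  first
                  | (apply Prod.ext <;> simp <;> omega)
                  | (exfalso; omega))
            · rw [if_neg (by simp [Ne.symm ha] : ¬ (['/', '*'] : List Char) <+: '/' :: c2 :: t),
                if_neg (by simp [Ne.symm hb] : ¬ (['/', '/'] : List Char) <+: '/' :: c2 :: t)]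
              have hscan : get1stSymPosScan ('/' :: c2 :: t) i = get1stSymPosScan (c2 :: t) (i + 1) := by
                simp only [get1stSymPosScan, reduceIte]
                split <;> simp_all
              rw [hscan, ih]
              exact (pick_shift _ _ _ _ (PySem.Chars.neg_one_le_find _ _)
                (PySem.Chars.neg_one_le_find _ _) (PySem.Chars.neg_one_le_find _ _)).symm
      · rw [if_neg (by simp [Ne.symm hq] : ¬ (['"'] : List Char) <+: c :: rest),
          if_neg (by simp [Ne.symm hs] : ¬ (['/', '*'] : List Char) <+: c :: rest),
          if_neg (by simp [Ne.symm hs] : ¬ (['/', '/'] : List Char) <+: c :: rest)]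
        have hscan : get1stSymPosScan (c :: rest) i = get1stSymPosScan rest (i + 1) := by
          simp [get1stSymPosScan, hq, hs]
        rw [hscan, ih]
        exact (pick_shift _ _ _ _ (PySem.Chars.neg_one_le_find _ _)
          (PySem.Chars.neg_one_le_find _ _) (PySem.Chars.neg_one_le_find _ _)).symm

set_option maxHeartbeats 2000000 in
theorem loopA3 (p1 p2 p3 : Int) (a b c : String) :
    get1stSymPosLoopA [(p1, a), (p2, b), (p3, c)] (-1) 0 =
      if 0 ≤ p1 ∧ (p2 < 0 ∨ p1 ≤ p2) ∧ (p3 < 0 ∨ p1 ≤ p3) then 0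
      else if 0 ≤ p2 ∧ (p3 < 0 ∨ p2 ≤ p3) then 1
      else if 0 ≤ p3 then 2
      else -1 := by
  have e0 : PySem.List.pyGetD [(p1,a),(p2,b),(p3,c)] (0:Int) (-1,"") = (p1,a) := rfl
  have e1 : PySem.List.pyGetD [(p1,a),(p2,b),(p3,c)] (1:Int) (-1,"") = (p2,b) := rfl
  have e2 : PySem.List.pyGetD [(p1,a),(p2,b),(p3,c)] (2:Int) (-1,"") = (p3,c) := rfl
  have em : PySem.List.pyGetD [(p1,a),(p2,b),(p3,c)] (-1:Int) (-1,"") = (p3,c) := rfl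
  have e0' : PySem.List.pyGetD [(p1,a),(p2,b),(p3,c)] ((0:Nat):Int) (-1,"") = (p1,a) := rfl
  have e1' : PySem.List.pyGetD [(p1,a),(p2,b),(p3,c)] ((1:Nat):Int) (-1,"") = (p2,b) := rfl
  have e2' : PySem.List.pyGetD [(p1,a),(p2,b),(p3,c)] ((2:Nat):Int) (-1,"") = (p3,c) := rfl
  have stop : ∀ m : Int, get1stSymPosLoopA [(p1,a),(p2,b),(p3,c)] m 3 = m := by
    intro m; rw [get1stSymPosLoopA]; norm_num
  by_cases h1 : 0 ≤ p1 <;> by_cases h2 : 0 ≤ p2 <;> by_cases h3 : 0 ≤ p3 <;>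
    by_cases h12 : p2 < p1 <;> by_cases h13 : p3 < p1 <;> by_cases h23 : p3 < p2 <;>
    (rw [get1stSymPosLoopA]
     try norm_num [e0, e0', e1, e1', e2, e2', em, h1, h2, h3, h12, h13, h23]
     try rw [get1stSymPosLoopA]
     try norm_num [e0, e0', e1, e1', e2, e2', em, h1, h2, h3, h12, h13, h23]
     try rw [get1stSymPosLoopA]
     try norm_num [e0, e0', e1, e1', e2, e2', em, h1, h2, h3, h12, h13, h23]
     try simp only [stop]
     try split_ifs
     all_goals omega)

theorem findFrom_norm (L sub : List Char) (fromPos : Int) :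
    PySem.Chars.findFrom L sub fromPos none =
      if (L.length : Int) < fromPos then -1
      else
        let st : Nat := if fromPos < 0 then ((L.length : Int) + fromPos).toNat else fromPos.toNat
        if PySem.Chars.find (L.drop st) sub = -1 then -1
        else (st : Int) + PySem.Chars.find (L.drop st) sub := by
  simp only [PySem.Chars.findFrom]
  by_cases hneg : fromPos < 0
  · by_cases hz : fromPos + (L.length : Int) < 0
    · simp only [hneg, hz, if_true, reduceIte, List.take_length]
      have h0 : ((L.length : Int) + fromPos).toNat = 0 := by omega
      have h1 : ¬ ((L.length : Int) < fromPos) := by omega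
      simp [h0, h1, List.take_length]
    · simp only [hneg, hz, if_true, if_false, reduceIte, List.take_length]
      have h1 : ¬ ((L.length : Int) < fromPos) := by omega
      have h2 : ¬ ((L.length : Int) < fromPos + (L.length : Int)) := by omega
      have h3 : (fromPos + (L.length : Int)).toNat = ((L.length : Int) + fromPos).toNat := by omega
      have h4 : fromPos + (L.length : Int) = (((L.length : Int) + fromPos).toNat : Int) := by omega
      simp [h1, h2, List.take_length, h3]
      rw [h4]
      split_ifs <;> omega
  · by_cases hbig : (L.length : Int) < fromPos
    · simp only [hneg, hbig, if_true, if_false, reduceIte]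
      try simp [show (L.length : Int) < fromPos from hbig]
    · simp only [hneg, hbig, if_false, reduceIte, List.take_length]
      have h2 : fromPos = (fromPos.toNat : Int) := by omega
      have h5 : ¬ ((L.length : Int) < fromPos) := hbig
      simp [h5, List.take_length]
      rw [h2]
      split_ifs <;> omega

-- ===== VERDICT (by name: the statement is the Claim_ definition above) =====
theorem get1stSymPos_spec : Claim_equal_get1stSymPos := by
  intro s fromPos _hDom
  unfold Spec_get1stSymPos
  have hA : get1stSymPos s fromPos =
      (let minIndex := get1stSymPosLoopA
        [(PySem.Str.findFrom s "\"" fromPos, "\""),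
         (PySem.Str.findFrom s "/*" fromPos, "/*"),
         (PySem.Str.findFrom s "//" fromPos, "//")] (-1) 0
       if minIndex = -1 then ((-1 : Int), (none : Option String))
       else
         let pb := PySem.List.pyGetD
           [(PySem.Str.findFrom s "\"" fromPos, "\""),
            (PySem.Str.findFrom s "/*" fromPos, "/*"),
            (PySem.Str.findFrom s "//" fromPos, "//")] minIndex (-1, "")
         (pb.1, some pb.2)) := rfl
  have hB : get1stSymPos_alt s fromPos =
      get1stSymPosScan
        (s.toList.drop (if fromPos < 0 then ((s.toList.length : Int) + fromPos).toNat else fromPos.toNat))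
        (if fromPos < 0 then ((s.toList.length : Int) + fromPos).toNat else fromPos.toNat) := rfl
  set st : Nat := if fromPos < 0 then ((s.toList.length : Int) + fromPos).toNat else fromPos.toNat with hst
  have hFF : ∀ sub : List Char, PySem.Chars.findFrom s.toList sub fromPos none =
      if (s.toList.length : Int) < fromPos then -1
      else if PySem.Chars.find (s.toList.drop st) sub = -1 then -1
      else (st : Int) + PySem.Chars.find (s.toList.drop st) sub := by
    intro sub
    rw [findFrom_norm]
  rw [hA, hB, loopA3, scan_eq_pick]
  simp only [PySem.Str.findFrom_eq]
  have t1 : ("\"" : String).toList = ['"'] := rfl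
  have t2 : ("/*" : String).toList = ['/', '*'] := rfl
  have t3 : ("//" : String).toList = ['/', '/'] := rfl
  simp only [t1, t2, t3]
  rw [hFF, hFF, hFF]
  by_cases hbig : (s.toList.length : Int) < fromPos
  · have hdrop : s.toList.drop st = [] := by
      apply List.drop_eq_nil_of_le
      simp only [hst]
      split_ifs <;> omega
    rw [hdrop]
    simp only [hbig, if_true, reduceIte]
    rw [find_nil_ne _ (by simp), find_nil_ne _ (by simp), find_nil_ne _ (by simp)]
    norm_num [pvPick]
  · simp only [hbig, if_false, reduceIte]
    have g1 := PySem.Chars.neg_one_le_find (s.toList.drop st) ['"']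
    have g2 := PySem.Chars.neg_one_le_find (s.toList.drop st) ['/', '*']
    have g3 := PySem.Chars.neg_one_le_find (s.toList.drop st) ['/', '/']
    by_cases e1 : PySem.Chars.find (s.toList.drop st) ['"'] = -1 <;>
      by_cases e2 : PySem.Chars.find (s.toList.drop st) ['/', '*'] = -1 <;>
      by_cases e3 : PySem.Chars.find (s.toList.drop st) ['/', '/'] = -1 <;>
      simp only [e1, e2, e3, if_true, if_false, reduceIte] <;>
      (unfold pvPick
       split_ifs <;>
        first
        | rfl
        | (exfalso; omega))
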